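-- pv_equiv track=rewrite | github.com/kush250/Text-Based_Adventure_Game | adventure.py | input_match
-- ===== SOURCE A (Python) =====
-- def input_match(string_input, options_valid):
--     verb_matches = []
--     leng=len(options_valid)
--     if options_valid is None or leng == 0:
--         return verb_matches
--     for verbe in options_valid:
--         if verbe == string_input:
--             return [verbe]
--         else:
--             if string_input in verbe:
--                 verb_matches.append(verbe)
--     return verb_matches
-- ===== SOURCE B (Python) =====
-- def input_match(string_input, options_valid):
--     if not options_valid:
--         return []
--     for verbe in options_valid:
--         if verbe == string_input:
--             return [verbe]
--     return [v for v in options_valid if string_input in v]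
-- ===== Notes on version B (the rewrite author's own statement) =====
-- stated objective: simpler
-- what changed: Replaces A's single interleaved scan that accumulates substring matches while watching for an exact match by two separate passes: one scan for the first exact match, then a plain comprehension over the whole list for substring matches if none was exact.
import Mathlib
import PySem

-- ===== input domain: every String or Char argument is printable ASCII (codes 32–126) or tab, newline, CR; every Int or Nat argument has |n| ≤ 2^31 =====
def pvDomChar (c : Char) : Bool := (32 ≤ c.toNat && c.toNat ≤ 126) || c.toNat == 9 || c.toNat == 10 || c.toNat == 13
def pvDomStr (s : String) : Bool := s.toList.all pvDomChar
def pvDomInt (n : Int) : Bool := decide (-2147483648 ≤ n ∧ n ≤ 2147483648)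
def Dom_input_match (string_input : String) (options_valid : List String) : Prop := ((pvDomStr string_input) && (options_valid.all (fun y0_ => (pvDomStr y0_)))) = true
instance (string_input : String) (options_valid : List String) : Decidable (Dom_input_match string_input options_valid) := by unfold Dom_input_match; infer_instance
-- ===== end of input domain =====

-- B replaces A's single interleaved scan by two passes (exact-match scan, then a substring filter); same cost, simpler.

-- ===== PORT A =====
-- A's for-loop: accumulates substring matches, returns [verbe] on the first exact match.
def inputMatchLoopA (string_input : String) : List String → List String → List String
  | [], acc => acc
  | verbe :: rest, acc =>
    if verbe = string_input then [verbe]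
    else if PySem.Str.isIn string_input verbe then inputMatchLoopA string_input rest (acc ++ [verbe])
    else inputMatchLoopA string_input rest acc

def input_match (string_input : String) (options_valid : List String) : List String :=
  if options_valid.length = 0 then []
  else inputMatchLoopA string_input options_valid []

-- ===== PORT B =====
def input_match_alt (string_input : String) (options_valid : List String) : List String :=
  if options_valid = [] then []
  else
    match options_valid.find? (fun verbe => verbe = string_input) with
    | some verbe => [verbe]
    | none => options_valid.filter (fun v => PySem.Str.isIn string_input v)

-- ===== PRECONDITION & SPEC =====
def Spec_input_match (string_input : String) (options_valid : List String) (out : List String) : Prop := out = input_match_alt string_input options_valid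
instance (string_input : String) (options_valid : List String) (out : List String) : Decidable (Spec_input_match string_input options_valid out) := by unfold Spec_input_match; infer_instance

-- ===== CLAIM (what is proved, stated in full; the proofs are below) =====
def Claim_equal_input_match : Prop := ∀ (string_input : String) (options_valid : List String), Dom_input_match string_input options_valid → Spec_input_match string_input options_valid (input_match string_input options_valid)

-- ===== LEMMAS AND PROOFS =====
theorem inputMatchLoopA_eq (s : String) (opts : List String) : ∀ acc : List String,
    inputMatchLoopA s opts acc =
      match opts.find? (fun verbe => verbe = s) with
      | some verbe => [verbe]
      | none => acc ++ opts.filter (fun v => PySem.Str.isIn s v) := by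
  induction opts with
  | nil => intro acc; simp [inputMatchLoopA]
  | cons v rest ih =>
    intro acc
    by_cases hv : v = s
    · simp [inputMatchLoopA, hv, List.find?]
    · cases hin : PySem.Chars.isIn s.toList v.toList <;>
        simp [inputMatchLoopA, hv, ih, List.find?, List.filter, hin]

-- ===== VERDICT (by name: the statement is the Claim_ definition above) =====
theorem input_match_spec : Claim_equal_input_match := by
  intro s opts _
  unfold Spec_input_match input_match input_match_alt
  cases opts with
  | nil => simp
  | cons v rest =>
    simp only [List.length_cons, Nat.succ_ne_zero, if_false, reduceCtorEq]
    rw [inputMatchLoopA_eq]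
    cases h : (v :: rest).find? (fun verbe => verbe = s) <;> simp [h]
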